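-- pv_equiv track=rewrite | github.com/LaiHOLA/SideFormer-ReworkOfSlideformers | T1M2/t1m2_train_profiler_beta.py | parse_layer_spec
-- ===== SOURCE A (Python) =====
-- from typing import Dict, List, Optional, Tuple, Set
--
-- def parse_layer_spec(spec: str, n_layers: int) -> Set[int]:
--     """
--     spec examples:
--       ""          -> empty set
--       "all"       -> {0..n-1}
--       "none"      -> empty set
--       "0-13"      -> 0..13
--       "0-13,20,22-27"
--     """
--     spec = (spec or "").strip().lower()
--     if spec in ("", "none"):
--         return set()
--     if spec == "all":
--         return set(range(n_layers))
--     out: Set[int] = set()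
--     parts = [p.strip() for p in spec.split(",") if p.strip()]
--     for p in parts:
--         if "-" in p:
--             a, b = p.split("-", 1)
--             a = int(a.strip())
--             b = int(b.strip())
--             if a > b:
--                 a, b = b, a
--             for i in range(a, b + 1):
--                 if 0 <= i < n_layers:
--                     out.add(i)
--         else:
--             i = int(p)
--             if 0 <= i < n_layers:
--                 out.add(i)
--     return out
-- ===== SOURCE B (Python) =====
-- def _collect(s, n_layers, out):
--     # recursive descent over the raw string: peel off the text before the next
--     # comma, turn the token into a clamped interval, bulk-union it, recurse.
--     cut = s.find(",")
--     t = (s if cut < 0 else s[:cut]).strip()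
--     if t:
--         if "-" in t:
--             x, y = t.split("-", 1)
--             a, b = int(x.strip()), int(y.strip())
--         else:
--             a = b = int(t)
--         out |= set(range(max(0, min(a, b)), min(n_layers - 1, max(a, b)) + 1))
--     return out if cut < 0 else _collect(s[cut + 1:], n_layers, out)
--
-- def parse_layer_spec(spec, n_layers):
--     s = (spec or "").strip().lower()
--     if s in ("", "none"):
--         return set()
--     if s == "all":
--         return set(range(n_layers))
--     return _collect(s, n_layers, set())
-- ===== Notes on version B (the rewrite author's own statement) =====
-- stated objective: alternative
-- what changed: B drops A's split-into-a-list/strip-comprehension/loop pipeline entirely: a recursive helper descends the raw string, locating each comma with s.find and slicing off the token, reduces the token to a clamped interval [max(0,min(a,b)), min(n_layers-1,max(a,b))] and bulk-unions one range per token, instead of A's per-part loop that iterates every integer of the raw range and tests 0<=i<n_layers element by element.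
import Mathlib
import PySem

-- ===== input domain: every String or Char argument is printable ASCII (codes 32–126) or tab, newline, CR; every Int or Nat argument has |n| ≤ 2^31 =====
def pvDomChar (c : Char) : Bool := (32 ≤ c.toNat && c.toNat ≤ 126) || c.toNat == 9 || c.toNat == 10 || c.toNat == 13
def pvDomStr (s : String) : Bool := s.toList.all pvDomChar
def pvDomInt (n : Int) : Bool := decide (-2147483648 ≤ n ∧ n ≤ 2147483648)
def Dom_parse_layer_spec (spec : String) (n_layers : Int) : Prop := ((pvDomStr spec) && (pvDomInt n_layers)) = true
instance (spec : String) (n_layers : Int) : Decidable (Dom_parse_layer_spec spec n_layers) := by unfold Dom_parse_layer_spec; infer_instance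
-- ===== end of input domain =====

-- B replaces A's split-into-a-parts-list-then-loop by a recursive descent over the raw
-- string (peel the text before the next comma with find/slices, reduce the token to a
-- clamped interval, bulk-union it, recurse on the remainder) — objective: alternative.

-- ===== PORT A =====
def parse_layer_spec (spec : String) (n_layers : Int) : List Int :=
  let s := PySem.Chars.lower (PySem.Chars.strip spec.toList)
  if s = [] ∨ s = "none".toList then []
  else if s = "all".toList then PySem.Set.ofList (PySem.List.pyRange 0 n_layers 1)
  else
    let parts := ((PySem.Chars.splitOn s ",".toList).map PySem.Chars.strip).filter (fun p => p ≠ [])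
    parts.foldl (fun out p =>
      if PySem.Chars.isIn "-".toList p then
        match PySem.Chars.splitOnMax p "-".toList 1 with
        | [x, y] =>
          match PySem.Int.ofChars? (PySem.Chars.strip x), PySem.Int.ofChars? (PySem.Chars.strip y) with
          | some a, some b =>
            let ab := if a > b then (b, a) else (a, b)
            (PySem.List.pyRange ab.1 (ab.2 + 1) 1).foldl
              (fun out i => if 0 ≤ i ∧ i < n_layers then PySem.Set.add out i else out) out
          | _, _ => out   -- int() ValueError: excluded by Pre_
        | _ => out        -- unreachable ('-' ∈ p gives two pieces)
      else
        match PySem.Int.ofChars? p with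
        | some i => if 0 ≤ i ∧ i < n_layers then PySem.Set.add out i else out
        | none => out) [] -- int() ValueError: excluded by Pre_

-- ===== PORT B =====
-- the token→clamped-interval step of _collect (the 'if t:' body of Source B)
def pvHandle (n_layers : Int) (out : List Int) (head : List Char) : List Int :=
  let t := PySem.Chars.strip head
  if t = [] then out
  else
    let ab? : Option (Int × Int) :=
      if PySem.Chars.isIn "-".toList t then
        match PySem.Chars.splitOnMax t "-".toList 1 with
        | x :: rest =>
          match rest with
          | y :: more =>
            match more with
            | [] =>
              (PySem.Int.ofChars? (PySem.Chars.strip x)).bind fun a =>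
                (PySem.Int.ofChars? (PySem.Chars.strip y)).map fun b => (a, b)
            | _ :: _ => none   -- unreachable ('-' ∈ t gives two pieces)
          | [] => none
        | [] => none
      else (PySem.Int.ofChars? t).map fun i => (i, i)
    match ab? with
    | none => out       -- int() ValueError: excluded by Pre_
    | some (a, b) =>
      PySem.Set.update out (PySem.List.pyRange (max 0 (min a b)) (min (n_layers - 1) (max a b) + 1) 1)

-- _collect of Source B: recursive descent over the raw string via s.find(",") and slices
def pvCollect (s : List Char) (n_layers : Int) (out : List Int) : List Int :=
  let cut := PySem.Chars.find s ",".toList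
  let out' := pvHandle n_layers out (if cut < 0 then s else PySem.Chars.slice s none (some cut))
  if h : cut < 0 then out'
  else pvCollect (PySem.Chars.slice s (some (cut + 1)) none) n_layers out'
termination_by s.length
decreasing_by
  have h0 : 0 ≤ PySem.Chars.find s ",".toList := by omega
  have hsp := (PySem.Chars.find_spec h0).1
  have h1 : (PySem.Chars.find s ",".toList).toNat < s.length := by
    have h2 := hsp.length_le
    rw [List.length_drop] at h2
    have h3 : (",".toList).length = 1 := by decide
    omega
  rw [PySem.Chars.slice_eq_listSlice, PySem.List.slice_from _ (by omega)]
  rw [List.length_drop]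
  omega

def parse_layer_spec_alt (spec : String) (n_layers : Int) : List Int :=
  let s := PySem.Chars.lower (PySem.Chars.strip spec.toList)
  if s = [] ∨ s = "none".toList then []
  else if s = "all".toList then PySem.Set.ofList (PySem.List.pyRange 0 n_layers 1)
  else pvCollect s n_layers []

-- ===== PRECONDITION & SPEC =====
-- Pre_ excludes exactly the inputs where A raises ValueError: some comma part is neither
-- empty nor a valid int (or, with '-', does not split into two valid ints).
def pvPartOK (q : List Char) : Bool :=
  if PySem.Chars.isIn "-".toList q then
    match PySem.Chars.splitOnMax q "-".toList 1 with
    | x :: rest =>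
      match rest with
      | y :: more =>
        match more with
        | [] =>
          (PySem.Int.ofChars? (PySem.Chars.strip x)).isSome && (PySem.Int.ofChars? (PySem.Chars.strip y)).isSome
        | _ :: _ => false
      | [] => false
    | [] => false
  else (PySem.Int.ofChars? q).isSome

def Pre_parse_layer_spec (spec : String) (n_layers : Int) : Prop :=
  let s := PySem.Chars.lower (PySem.Chars.strip spec.toList)
  s = [] ∨ s = "none".toList ∨ s = "all".toList ∨
    ∀ p ∈ PySem.Chars.splitOn s ",".toList, PySem.Chars.strip p = [] ∨ pvPartOK (PySem.Chars.strip p) = true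
instance (spec : String) (n_layers : Int) : Decidable (Pre_parse_layer_spec spec n_layers) := by
  unfold Pre_parse_layer_spec; infer_instance

def pvWitness_parse_layer_spec : String × Int := ("0-2, 5 ,7-4", 6)

def Spec_parse_layer_spec (spec : String) (n_layers : Int) (out : List Int) : Prop := out = parse_layer_spec_alt spec n_layers
instance (spec : String) (n_layers : Int) (out : List Int) : Decidable (Spec_parse_layer_spec spec n_layers out) := by unfold Spec_parse_layer_spec; infer_instance

-- ===== CLAIM (what is proved, stated in full; the proofs are below) =====
def Claim_equal_parse_layer_spec : Prop := ∀ (spec : String) (n_layers : Int), Dom_parse_layer_spec spec n_layers → Pre_parse_layer_spec spec n_layers → Spec_parse_layer_spec spec n_layers (parse_layer_spec spec n_layers)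

-- ===== LEMMAS AND PROOFS =====

-- A's per-part loop body, abstracted so the foldl can be rewritten pointwise
def pvStepA (n : Int) : List Int → List Char → List Int := fun out p =>
      if PySem.Chars.isIn "-".toList p then
        match PySem.Chars.splitOnMax p "-".toList 1 with
        | [x, y] =>
          match PySem.Int.ofChars? (PySem.Chars.strip x), PySem.Int.ofChars? (PySem.Chars.strip y) with
          | some a, some b =>
            let ab := if a > b then (b, a) else (a, b)
            (PySem.List.pyRange ab.1 (ab.2 + 1) 1).foldl
              (fun out i => if 0 ≤ i ∧ i < n then PySem.Set.add out i else out) out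
          | _, _ => out
        | _ => out
      else
        match PySem.Int.ofChars? p with
        | some i => if 0 ≤ i ∧ i < n then PySem.Set.add out i else out
        | none => out

-- A's step on an empty token is a no-op
theorem pv_stepA_nil (n : Int) (out : List Int) : pvStepA n out [] = out := by
  unfold pvStepA
  rw [show PySem.Chars.isIn "-".toList [] = false from by decide]
  simp only [Bool.false_eq_true, if_false]
  rw [show PySem.Int.ofChars? [] = none from by decide]

-- clamping a range by the bound 0 ≤ i < n is intersecting it with [0, n)
theorem pv_filter_pyRange (a c n : Int) :
    (PySem.List.pyRange a c 1).filter (fun i => decide (0 ≤ i ∧ i < n))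
      = PySem.List.pyRange (max 0 a) (min n c) 1 := by
  by_cases h : c ≤ a
  · rw [PySem.List.pyRange_one_eq_nil h, PySem.List.pyRange_one_eq_nil (by omega)]
    rfl
  · rw [not_le] at h
    rw [PySem.List.pyRange_one_cons h]
    rw [List.filter_cons]
    by_cases hp : 0 ≤ a ∧ a < n
    · simp only [hp, decide_true, and_self]
      rw [pv_filter_pyRange (a+1) c n]
      rw [show max 0 a = a by omega, show max 0 (a+1) = a + 1 by omega, eq_comm,
          PySem.List.pyRange_one_cons (lt_min hp.2 h)]
      simp
    · simp only [hp, decide_false]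
      rw [pv_filter_pyRange (a+1) c n]
      simp only [Bool.false_eq_true, if_false]
      rcases not_and_or.mp hp with h0 | hn
      · congr 1; omega
      · rw [PySem.List.pyRange_one_eq_nil (by omega), PySem.List.pyRange_one_eq_nil (by omega)]
termination_by (c - a).toNat
decreasing_by all_goals omega

theorem pv_step_eq (n : Int) (out : List Int) (a b : Int) :
    (PySem.List.pyRange (if a > b then (b, a) else (a, b)).1 ((if a > b then (b, a) else (a, b)).2 + 1) 1).foldl
        (fun out i => if 0 ≤ i ∧ i < n then PySem.Set.add out i else out) out
      = PySem.Set.update out (PySem.List.pyRange (max 0 (min a b)) (min (n - 1) (max a b) + 1) 1) := by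
  have hswap : (if a > b then (b, a) else (a, b)) = (min a b, max a b) := by
    by_cases h : a > b <;> simp [h] <;> omega
  rw [hswap]
  rw [PySem.List.foldl_ite_eq_foldl_filter (p := fun i => 0 ≤ i ∧ i < n) PySem.Set.add,
      pv_filter_pyRange, show min n (max a b + 1) = min (n - 1) (max a b) + 1 by omega]
  rfl

theorem pv_single_eq (n : Int) (out : List Int) (i : Int) :
    (if 0 ≤ i ∧ i < n then PySem.Set.add out i else out)
      = PySem.Set.update out (PySem.List.pyRange (max 0 (min i i)) (min (n - 1) (max i i) + 1) 1) := by
  by_cases h : 0 ≤ i ∧ i < n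
  · rw [if_pos h, show max 0 (min i i) = i by omega, show min (n-1) (max i i) + 1 = i + 1 by omega,
       PySem.List.pyRange_one_singleton]
    rfl
  · rw [if_neg h, PySem.List.pyRange_one_eq_nil (by omega)]
    rfl

-- B's token step agrees with A's per-part step applied to the stripped token
theorem pv_handle_eq (n : Int) (out : List Int) (head : List Char) :
    pvHandle n out head = pvStepA n out (PySem.Chars.strip head) := by
  unfold pvHandle
  by_cases h0 : PySem.Chars.strip head = []
  · rw [h0, if_pos rfl]
    exact (pv_stepA_nil n out).symm
  · rw [if_neg h0]
    unfold pvStepA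
    by_cases hin : PySem.Chars.isIn "-".toList (PySem.Chars.strip head) = true
    · rw [if_pos hin, if_pos hin]
      rcases hsp : PySem.Chars.splitOnMax (PySem.Chars.strip head) "-".toList 1 with _ | ⟨x, t⟩
      · rfl
      · rcases t with _ | ⟨y, t⟩
        · rfl
        · rcases t with _ | ⟨z, t⟩
          · rcases hx : PySem.Int.ofChars? (PySem.Chars.strip x) with _ | a
            · simp [hx]
            · rcases hy : PySem.Int.ofChars? (PySem.Chars.strip y) with _ | b
              · simp [hx, hy]
              · simp only [hx, hy, Option.bind_some, Option.map_some]
                exact (pv_step_eq n out a b).symm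
          · rfl
    · rw [if_neg hin, if_neg hin]
      rcases hi : PySem.Int.ofChars? (PySem.Chars.strip head) with _ | i
      · simp
      · simp only [Option.map_some]
        exact (pv_single_eq n out i).symm

-- A's strip-then-filter-then-fold equals folding the raw parts with strip inside the step
theorem pv_fold_strip_filter (g : List Int → List Char → List Int) (hg : ∀ out, g out [] = out)
    (l : List (List Char)) (out : List Int) :
    (((l.map PySem.Chars.strip).filter (fun p => p ≠ [])).foldl g out)
      = l.foldl (fun o p => g o (PySem.Chars.strip p)) out := by
  induction l generalizing out with
  | nil => rfl
  | cons p t ih =>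
    simp only [List.map_cons, List.filter_cons, List.foldl_cons]
    by_cases h : PySem.Chars.strip p = []
    · simp only [h, decide_false, ne_eq, not_true_eq_false, Bool.false_eq_true, if_false]
      rw [ih, hg]
    · simp only [ne_eq, h, not_false_eq_true, decide_true, if_true, List.foldl_cons]
      rw [ih]

-- reference splitter: Python's s.split(",") written as one structural recursion
def pvSplit (cur : List Char) : List Char → List (List Char)
  | [] => [cur.reverse]
  | c :: rest => if c = ',' then cur.reverse :: pvSplit [] rest else pvSplit (c :: cur) rest

theorem pv_go_eq (fuel : Nat) (l cur : List Char) (acc : List (List Char)) (h : l.length < fuel) :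
    PySem.Chars.splitOn.go [','] fuel l cur acc = acc.reverse ++ pvSplit cur l := by
  induction fuel generalizing l cur acc with
  | zero => omega
  | succ fuel ih =>
    cases l with
    | nil => simp [PySem.Chars.splitOn.go, pvSplit]
    | cons c rest =>
      rw [PySem.Chars.splitOn.go]
      by_cases hc : c = ','
      · subst hc
        have hp : List.isPrefixOf [','] (',' :: rest) = true := by simp [List.isPrefixOf]
        simp only [hp, if_true, List.length_cons, List.length_nil, List.drop_succ_cons, List.drop_zero]
        rw [ih rest [] _ (by simpa using Nat.lt_of_succ_lt_succ (by simpa using h))]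
        simp [pvSplit]
      · have hp : List.isPrefixOf [','] (c :: rest) = false := by
          simp [List.isPrefixOf]; exact fun hh => (hc hh.symm).elim
        simp only [hp, Bool.false_eq_true, if_false]
        rw [ih rest (c :: cur) _ (by simp at h ⊢; omega)]
        simp [pvSplit, hc]

theorem pv_splitOn_comma (s : List Char) : PySem.Chars.splitOn s [','] = pvSplit [] s := by
  rw [PySem.Chars.splitOn, pv_go_eq _ _ _ _ (by omega)]
  simp

theorem pv_singleton_prefix (d : Char) (l : List Char) : [d] <+: l ↔ l.head? = some d := by
  cases l with
  | nil => simp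
  | cons c rest => simp [List.cons_prefix_cons, eq_comm]

theorem pv_find_cons (c d : Char) (rest : List Char) :
    PySem.Chars.find (c :: rest) [d] =
      if c = d then 0
      else if PySem.Chars.find rest [d] < 0 then -1 else PySem.Chars.find rest [d] + 1 := by
  by_cases hc : c = d
  · subst hc
    have hnn : 0 ≤ PySem.Chars.find (c :: rest) [c] := by
      rw [PySem.Chars.find_nonneg_iff]
      exact (List.singleton_infix_iff c _).mpr (List.mem_cons_self)
    obtain ⟨hpre, hmin⟩ := PySem.Chars.find_spec hnn
    have h0 : (PySem.Chars.find (c :: rest) [c]).toNat = 0 := by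
      by_contra hne
      exact hmin 0 (by omega) (by simp)
    rw [if_pos rfl]
    omega
  · simp only [if_neg hc]
    by_cases hr : PySem.Chars.find rest [d] < 0
    · rw [if_pos hr]
      have : PySem.Chars.find rest [d] = -1 := by
        have := PySem.Chars.neg_one_le_find rest [d]; omega
      rw [PySem.Chars.find_eq_neg_one_iff] at this
      rw [PySem.Chars.find_eq_neg_one_iff]
      intro hin
      rw [List.singleton_infix_iff] at hin this
      rcases List.mem_cons.mp hin with h | h
      · exact hc h.symm
      · exact this h
    · rw [if_neg hr]
      have hrn : 0 ≤ PySem.Chars.find rest [d] := by omega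
      obtain ⟨hpre, hmin⟩ := PySem.Chars.find_spec hrn
      have hnn : 0 ≤ PySem.Chars.find (c :: rest) [d] := by
        rw [PySem.Chars.find_nonneg_iff, List.singleton_infix_iff]
        exact List.mem_cons_of_mem c (List.singleton_infix_iff d rest |>.mp
          ((PySem.Chars.find_nonneg_iff rest [d]).mp hrn))
      obtain ⟨hpre', hmin'⟩ := PySem.Chars.find_spec hnn
      have hkey : (PySem.Chars.find (c :: rest) [d]).toNat = (PySem.Chars.find rest [d]).toNat + 1 := by
        have hub : ¬ ((PySem.Chars.find rest [d]).toNat + 1 < (PySem.Chars.find (c :: rest) [d]).toNat) := by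
          intro hlt
          exact hmin' _ hlt (by simpa [List.drop_succ_cons] using hpre)
        have hlb : ¬ ((PySem.Chars.find (c :: rest) [d]).toNat < (PySem.Chars.find rest [d]).toNat + 1) := by
          intro hlt
          rcases Nat.eq_zero_or_pos (PySem.Chars.find (c :: rest) [d]).toNat with h0 | h0
          · rw [h0] at hpre'
            rw [List.drop_zero, pv_singleton_prefix] at hpre'
            simp at hpre'
            exact hc hpre'
          · have := hmin ((PySem.Chars.find (c :: rest) [d]).toNat - 1) (by omega)
            apply this
            have heq : (PySem.Chars.find (c :: rest) [d]).toNat = ((PySem.Chars.find (c :: rest) [d]).toNat - 1) + 1 := by omega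
            rw [heq, List.drop_succ_cons] at hpre'
            exact hpre'
        omega
      omega

theorem pvSplit_find (s : List Char) (cur : List Char) :
    pvSplit cur s =
      if PySem.Chars.find s [','] < 0 then [cur.reverse ++ s]
      else (cur.reverse ++ s.take (PySem.Chars.find s [',']).toNat)
           :: pvSplit [] (s.drop ((PySem.Chars.find s [',']).toNat + 1)) := by
  induction s generalizing cur with
  | nil =>
    have : PySem.Chars.find [] [','] = -1 := by decide
    simp [pvSplit, this]
  | cons c rest ih =>
    rw [pv_find_cons]
    by_cases hc : c = ','
    · subst hc
      simp [pvSplit]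
    · simp only [if_neg hc]
      by_cases hr : PySem.Chars.find rest [','] < 0
      · simp only [if_pos hr]
        rw [show pvSplit cur (c :: rest) = pvSplit (c :: cur) rest from by simp [pvSplit, hc],
            ih, if_pos hr]
        simp
      · simp only [if_neg hr]
        have h1 : ¬ (PySem.Chars.find rest [','] + 1 < 0) := by omega
        rw [if_neg h1,
            show pvSplit cur (c :: rest) = pvSplit (c :: cur) rest from by simp [pvSplit, hc],
            ih, if_neg hr]
        have ht : (PySem.Chars.find rest [','] + 1).toNat = (PySem.Chars.find rest [',']).toNat + 1 := by omega
        simp [ht, List.take_succ_cons]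

-- B's recursive descent folds pvHandle over the comma parts
theorem pv_collect_eq (s : List Char) (n : Int) (acc : List Int) :
    pvCollect s n acc = (pvSplit [] s).foldl (fun o head => pvHandle n o head) acc := by
  have hcm : (",".toList) = [','] := by decide
  rw [pvCollect]
  by_cases h : PySem.Chars.find s ",".toList < 0
  · rw [dif_pos h, if_pos h]
    rw [show pvSplit [] s = [s] from by rw [pvSplit_find, if_pos (hcm ▸ h)]; simp]
    simp
  · have h0 : 0 ≤ PySem.Chars.find s ",".toList := by omega
    have h1 : (PySem.Chars.find s ",".toList).toNat < s.length := by
      have h2 := ((PySem.Chars.find_spec h0).1).length_le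
      rw [List.length_drop] at h2
      have h3 : (",".toList).length = 1 := by decide
      omega
    rw [dif_neg h, if_neg h]
    rw [pv_collect_eq _ n _]
    rw [show pvSplit [] s
          = (s.take (PySem.Chars.find s ",".toList).toNat)
            :: pvSplit [] (s.drop ((PySem.Chars.find s ",".toList).toNat + 1)) from by
      rw [pvSplit_find, if_neg (by rw [← hcm]; omega)]; simp [← hcm]]
    rw [List.foldl_cons]
    congr 1
    · congr 1
      rw [PySem.Chars.slice_eq_listSlice, PySem.List.slice_to _ (by omega)]
    · rw [PySem.Chars.slice_eq_listSlice, PySem.List.slice_from _ (by omega),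
          show (PySem.Chars.find s ",".toList + 1).toNat
             = (PySem.Chars.find s ",".toList).toNat + 1 from by omega]
termination_by s.length
decreasing_by
  rw [PySem.Chars.slice_eq_listSlice, PySem.List.slice_from _ (by omega), List.length_drop]
  omega

-- ===== VERDICT (by name: the statement is the Claim_ definition above) =====
theorem parse_layer_spec_spec : Claim_equal_parse_layer_spec := by
  intro spec n _ _
  show parse_layer_spec spec n = parse_layer_spec_alt spec n
  unfold parse_layer_spec parse_layer_spec_alt
  by_cases h1 : PySem.Chars.lower (PySem.Chars.strip spec.toList) = []
      ∨ PySem.Chars.lower (PySem.Chars.strip spec.toList) = "none".toList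
  · simp only [h1, if_true]
  · simp only [h1, if_false]
    by_cases h2 : PySem.Chars.lower (PySem.Chars.strip spec.toList) = "all".toList
    · simp only [h2, if_true]
    · simp only [h2, if_false]
      have hcm : (",".toList) = [','] := by decide
      show ((((PySem.Chars.splitOn (PySem.Chars.lower (PySem.Chars.strip spec.toList)) ",".toList).map
          PySem.Chars.strip).filter (fun p => p ≠ [])).foldl (pvStepA n) [])
        = pvCollect (PySem.Chars.lower (PySem.Chars.strip spec.toList)) n []
      rw [pv_fold_strip_filter (pvStepA n) (pv_stepA_nil n),
          pv_collect_eq, ← pv_splitOn_comma, hcm]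
      exact PySem.List.foldl_congr_mem _ _ _ []
        (fun acc x _ => (pv_handle_eq n acc x).symm)
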